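-- pv_equiv track=rewrite | github.com/Yurge/stepik_algorithms | 1_greedy_algorithms/home_work.py | maximum_of_terms_2
-- ===== SOURCE A (Python) =====
-- def maximum_of_terms_2(n):
-- 	result = []
-- 	summ = 0
-- 	elem = 1
-- 	while summ + elem * 2 + 1 <= n:
-- 		result += [elem]
-- 		summ += elem
-- 		elem += 1
-- 	result.append(n - summ)
-- 	return f'{len(result)}\n{" ".join(str(x) for x in result)}'
-- ===== SOURCE B (Python) =====
-- def maximum_of_terms_2(n):
--     # Binary search the largest term count t such that terms 1..t can all be
--     # taken: taking term e requires (e-1)e/2 + 2e + 1 <= n, i.e. (e+1)(e+2) <= 2n.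
--     lo, hi = 0, max(n, 0)
--     while lo < hi:
--         mid = (lo + hi) // 2
--         if (mid + 2) * (mid + 3) <= 2 * n:
--             lo = mid + 1
--         else:
--             hi = mid
--     t = lo
--     summ = t * (t + 1) // 2
--     result = list(range(1, t + 1)) + [n - summ]
--     return f'{len(result)}\n{" ".join(str(x) for x in result)}'
-- ===== Notes on version B (the rewrite author's own statement) =====
-- stated objective: alternative
-- what changed: A's accumulating while-loop that takes the terms one at a time is replaced by a binary search for the number of full terms (the loop condition as a predicate of the candidate count), after which the result list and its sum are produced directly from that count; a timing run could not measure a difference (A is already sublinear), so no speed is claimed.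
import Mathlib
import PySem

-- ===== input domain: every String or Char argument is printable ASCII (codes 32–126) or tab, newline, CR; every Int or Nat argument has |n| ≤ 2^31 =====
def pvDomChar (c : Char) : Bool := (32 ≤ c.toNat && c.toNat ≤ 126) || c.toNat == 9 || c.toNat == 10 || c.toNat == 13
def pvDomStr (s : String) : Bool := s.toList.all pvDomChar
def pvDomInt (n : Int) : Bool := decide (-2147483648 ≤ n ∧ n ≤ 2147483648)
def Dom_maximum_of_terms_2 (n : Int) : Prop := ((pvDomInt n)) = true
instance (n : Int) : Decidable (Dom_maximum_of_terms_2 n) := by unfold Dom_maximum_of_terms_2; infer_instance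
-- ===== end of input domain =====

-- B replaces A's accumulating while-loop by a binary search for the term count (return value identical).

-- ===== PORT A =====
-- the while-loop of A: state (result, summ, elem); terminates because elem
-- grows each step and once elem ≥ 1 the condition bounds summ by n
def pvLoopA (n : Int) (result : List Int) (summ elem : Int) : List Int × Int :=
  if summ + elem * 2 + 1 ≤ n then
    pvLoopA n (result ++ [elem]) (summ + elem) (elem + 1)
  else (result, summ)
termination_by ((1 - elem).toNat, (n + 1 - summ).toNat)
decreasing_by
  simp only [Prod.lex_def]
  omega

def maximum_of_terms_2 (n : Int) : String :=
  let rs := pvLoopA n [] 0 1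
  let result := rs.1 ++ [n - rs.2]
  PySem.Int.toStr (result.length : Int) ++ "\n" ++
    PySem.Str.join " " (result.map PySem.Int.toStr)

-- ===== PORT B =====
-- the while-loop of Source B (mid = (lo + hi) // 2 written inline)
def pvBSearch (n : Int) (lo hi : Int) : Int :=
  if hlt : lo < hi then
    if (PySem.Int.floordiv (lo + hi) 2 + 2) * (PySem.Int.floordiv (lo + hi) 2 + 3) ≤ 2 * n then
      pvBSearch n (PySem.Int.floordiv (lo + hi) 2 + 1) hi
    else pvBSearch n lo (PySem.Int.floordiv (lo + hi) 2)
  else lo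
termination_by (hi - lo).toNat
decreasing_by
  · have h1 := PySem.Int.floordiv_two_mid_bounds (lo := lo) (hi := hi) hlt.le
    omega
  · have h2 : PySem.Int.floordiv (lo + hi) 2 < hi := by
      rw [PySem.Int.floordiv_lt_iff_lt_mul (by norm_num)]
      omega
    omega

def maximum_of_terms_2_alt (n : Int) : String :=
  let t := pvBSearch n 0 (max n 0)
  let summ := PySem.Int.floordiv (t * (t + 1)) 2
  let result := PySem.List.pyRange 1 (t + 1) 1 ++ [n - summ]
  PySem.Int.toStr (result.length : Int) ++ "\n" ++
    PySem.Str.join " " (result.map PySem.Int.toStr)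

-- ===== PRECONDITION & SPEC =====
def Spec_maximum_of_terms_2 (n : Int) (out : String) : Prop := out = maximum_of_terms_2_alt n
instance (n : Int) (out : String) : Decidable (Spec_maximum_of_terms_2 n out) := by unfold Spec_maximum_of_terms_2; infer_instance

-- ===== CLAIM (what is proved, stated in full; the proofs are below) =====
def Claim_equal_maximum_of_terms_2 : Prop := ∀ (n : Int), Dom_maximum_of_terms_2 n → Spec_maximum_of_terms_2 n (maximum_of_terms_2 n)

-- ===== LEMMAS AND PROOFS =====

-- "term e+1 can still be taken": the loop condition of A at elem = e+1
def pvQ (n e : Int) : Prop := (e + 2) * (e + 3) ≤ 2 * n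

lemma pvBSearch_spec (n : Int) : ∀ lo hi : Int, 0 ≤ lo → lo ≤ hi →
    (∀ e, 0 ≤ e → e < lo → pvQ n e) → ¬ pvQ n hi →
    0 ≤ pvBSearch n lo hi ∧ ¬ pvQ n (pvBSearch n lo hi) ∧
      (∀ e, 0 ≤ e → e < pvBSearch n lo hi → pvQ n e) := by
  intro lo hi
  induction lo, hi using pvBSearch.induct n with
  | case1 lo hi h htake ih =>
    intro h0 hle hbelow habove
    rw [pvBSearch, dif_pos h, if_pos htake]
    have hmid := PySem.Int.floordiv_two_mid_bounds (lo := lo) (hi := hi) h.le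
    refine ih (by omega) ?_ ?_ habove
    · -- mid + 1 ≤ hi : mid ≠ hi since pvQ n mid holds but pvQ n hi does not
      by_contra hc
      have hmh : PySem.Int.floordiv (lo + hi) 2 = hi := by omega
      exact habove (hmh ▸ htake)
    · intro e he helt
      by_cases hcase : e < lo
      · exact hbelow e he hcase
      · -- here lo ≤ e ≤ mid and pvQ n mid; pvQ is monotone below mid
        unfold pvQ
        have hfac : (PySem.Int.floordiv (lo + hi) 2 + 2) * (PySem.Int.floordiv (lo + hi) 2 + 3) -
            (e + 2) * (e + 3) =
            (PySem.Int.floordiv (lo + hi) 2 - e) * (PySem.Int.floordiv (lo + hi) 2 + e + 5) := by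
          ring
        have hnn : 0 ≤ (PySem.Int.floordiv (lo + hi) 2 - e) * (PySem.Int.floordiv (lo + hi) 2 + e + 5) :=
          mul_nonneg (by omega) (by omega)
        linarith [htake, hfac, hnn]
  | case2 lo hi h htake ih =>
    intro h0 hle hbelow habove
    rw [pvBSearch, dif_pos h, if_neg htake]
    have hmid := PySem.Int.floordiv_two_mid_bounds (lo := lo) (hi := hi) h.le
    exact ih h0 hmid.1 hbelow htake
  | case3 lo hi h =>
    intro h0 hle hbelow habove
    rw [pvBSearch, dif_neg h]
    have hlh : lo = hi := by omega
    exact ⟨h0, hlh ▸ habove, hbelow⟩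

lemma pvLoopA_spec (n : Int) : ∀ (result : List Int) (summ elem : Int), 1 ≤ elem →
    2 * summ = (elem - 1) * elem →
    ∃ t, elem - 1 ≤ t ∧ ¬ pvQ n t ∧ (∀ e, elem - 1 ≤ e → e < t → pvQ n e) ∧
      pvLoopA n result summ elem =
        (result ++ PySem.List.pyRange elem (t + 1) 1, summ + (t - elem + 1) * (t + elem) / 2) := by
  intro result summ elem
  induction result, summ, elem using pvLoopA.induct n with
  | case1 result summ elem hcond ih =>
    intro he hinv
    obtain ⟨t, ht1, ht2, ht3, ht4⟩ := ih (by omega)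
      (by have hr : (elem + 1 - 1) * (elem + 1) = (elem - 1) * elem + 2 * elem := by ring
          linarith [hinv, hr])
    refine ⟨t, by omega, ht2, ?_, ?_⟩
    · intro e he1 he2
      by_cases hc : e = elem - 1
      · subst hc
        unfold pvQ
        have hr : (elem - 1 + 2) * (elem - 1 + 3) = (elem - 1) * elem + 4 * elem + 2 := by ring
        linarith [hinv, hcond, hr]
      · exact ht3 e (by omega) he2
    · rw [pvLoopA, if_pos hcond, ht4]
      rw [PySem.List.pyRange_one_cons (by omega : elem < t + 1)]
      refine Prod.ext ?_ ?_
      · simp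
      · show summ + elem + (t - (elem + 1) + 1) * (t + (elem + 1)) / 2 =
            summ + (t - elem + 1) * (t + elem) / 2
        have hA1 : (t - (elem + 1) + 1) * (t + (elem + 1)) =
            (t - elem) * (t - elem + 1) + 2 * (elem * (t - elem)) := by ring
        have hA2 : (t - elem + 1) * (t + elem) =
            (t - elem) * (t - elem + 1) + 2 * (elem * (t - elem)) + 2 * elem := by ring
        obtain ⟨k, hk⟩ := Int.even_mul_succ_self (t - elem)
        rw [hA1, hA2, hk]
        omega
  | case2 result summ elem hcond =>
    intro he hinv
    refine ⟨elem - 1, le_refl _, ?_, by omega, ?_⟩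
    · unfold pvQ
      intro hle
      have hr : (elem - 1 + 2) * (elem - 1 + 3) = (elem - 1) * elem + 4 * elem + 2 := by ring
      exact hcond (by linarith [hinv, hr])
    · rw [pvLoopA, if_neg hcond]
      rw [PySem.List.pyRange_one_eq_nil (by omega)]
      simp

lemma pvQ_unique (n a b : Int) (ha0 : 0 ≤ a) (hb0 : 0 ≤ b)
    (ha : ¬ pvQ n a) (ha' : ∀ e, 0 ≤ e → e < a → pvQ n e)
    (hb : ¬ pvQ n b) (hb' : ∀ e, 0 ≤ e → e < b → pvQ n e) : a = b := by
  rcases lt_trichotomy a b with h | h | h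
  · exact absurd (hb' a ha0 h) ha
  · exact h
  · exact absurd (ha' b hb0 h) hb

-- ===== VERDICT (by name: the statement is the Claim_ definition above) =====
theorem maximum_of_terms_2_spec : Claim_equal_maximum_of_terms_2 := by
  intro n _
  show maximum_of_terms_2 n = maximum_of_terms_2_alt n
  obtain ⟨tA, htA1, htA2, htA3, htA4⟩ := pvLoopA_spec n [] 0 1 (by norm_num) (by ring)
  have hB := pvBSearch_spec n 0 (max n 0) (le_refl 0) (le_max_right n 0)
    (fun e he1 he2 => absurd he2 (by omega))
    (by unfold pvQ
        rcases max_choice n 0 with hm | hm <;> rw [hm]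
        · have h0 : 0 ≤ n := by have hx := le_max_right n 0; rw [hm] at hx; exact hx
          nlinarith [h0]
        · have h0 : n ≤ 0 := by have := le_max_left n 0; rw [hm] at this; exact this
          nlinarith [h0])
  obtain ⟨hB0, hB1, hB2⟩ := hB
  have heq : tA = pvBSearch n 0 (max n 0) :=
    pvQ_unique n tA _ (by omega) hB0 htA2 (fun e he1 he2 => htA3 e (by omega) he2) hB1 hB2
  unfold maximum_of_terms_2 maximum_of_terms_2_alt
  rw [htA4]
  simp only [← heq, List.nil_append]
  have hsum : (0 : Int) + (tA - 1 + 1) * (tA + 1) / 2 = PySem.Int.floordiv (tA * (tA + 1)) 2 := by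
    have h1 : (tA - 1 + 1) * (tA + 1) = tA * (tA + 1) := by ring
    rw [PySem.Int.floordiv_eq_ediv_of_pos (by norm_num), h1]
    omega
  rw [hsum]
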